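-- pv_equiv track=rewrite | github.com/gotsta1/three_in_row | backend/src/domain/game/match_finder.py | find_matches
-- ===== SOURCE A (Python) =====
-- from typing import Set, Tuple
--
-- Coord = Tuple[int, int]
--
-- def find_matches(board: list[list[str]]) -> Set[Coord]:
--     rows = len(board)
--     cols = len(board[0]) if rows else 0
--     matched: Set[Coord] = set()
--     for r in range(rows):
--         streak = 1
--         for c in range(1, cols):
--             if board[r][c] == board[r][c - 1]:
--                 streak += 1
--             else:
--                 if streak >= 3:
--                     for k in range(streak):
--                         matched.add((r, c - 1 - k))
--                 streak = 1
--         if streak >= 3: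
--             for k in range(streak):
--                 matched.add((r, cols - 1 - k))
--     for c in range(cols):
--         streak = 1
--         for r in range(1, rows):
--             if board[r][c] == board[r - 1][c]:
--                 streak += 1
--             else:
--                 if streak >= 3:
--                     for k in range(streak):
--                         matched.add((r - 1 - k, c))
--                 streak = 1
--         if streak >= 3:
--             for k in range(streak):
--                 matched.add((rows - 1 - k, c))
--     return matched
-- ===== SOURCE B (Python) =====
-- from typing import Set, Tuple
--
-- Coord = Tuple[int, int]
--
-- def find_matches(board: list[list[str]]) -> Set[Coord]:
--     rows = len(board)
--     cols = len(board[0]) if rows else 0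
--     matched: Set[Coord] = set()
--     for r in range(rows):
--         for c in range(cols):
--             if c == cols - 1 or board[r][c + 1] != board[r][c]:
--                 # c ends a maximal run; walk back to its start
--                 k = c
--                 while k > 0 and board[r][k - 1] == board[r][c]:
--                     k -= 1
--                 if c - k >= 2:
--                     for j in range(c, k - 1, -1):
--                         matched.add((r, j))
--     for c in range(cols):
--         for r in range(rows):
--             if r == rows - 1 or board[r + 1][c] != board[r][c]:
--                 k = r
--                 while k > 0 and board[k - 1][c] == board[r][c]:
--                     k -= 1
--                 if r - k >= 2:
--                     for j in range(r, k - 1, -1):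
--                         matched.add((j, c))
--     return matched
-- ===== Notes on version B (the rewrite author's own statement) =====
-- stated objective: alternative
-- what changed: Replaces the carried streak counter with its end-of-line flush by stateless per-cell run-end detection plus a backward walk from each run end to its start.
import Mathlib
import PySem

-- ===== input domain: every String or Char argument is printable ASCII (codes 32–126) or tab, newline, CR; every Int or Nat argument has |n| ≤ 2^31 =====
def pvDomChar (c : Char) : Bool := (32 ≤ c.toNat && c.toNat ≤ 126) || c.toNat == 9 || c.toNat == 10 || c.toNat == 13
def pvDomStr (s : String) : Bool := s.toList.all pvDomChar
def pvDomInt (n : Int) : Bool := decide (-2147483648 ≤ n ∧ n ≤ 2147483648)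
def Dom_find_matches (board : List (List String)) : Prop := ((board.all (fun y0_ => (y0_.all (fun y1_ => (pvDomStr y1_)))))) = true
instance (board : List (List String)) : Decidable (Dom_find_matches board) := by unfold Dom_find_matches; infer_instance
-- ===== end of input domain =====

-- B replaces A's carried streak counter (flushed at each break and at end of line) by stateless
-- per-cell run-end detection with a backward walk to the run start; same asymptotic cost.
-- Board accesses are in range under Pre_, so both ports read cells with getD (exact there).

-- ===== PORT A =====
-- cell accessor board[r][c] (in range under Pre_find_matches, where getD is exact)
def pvGetCell (board : List (List String)) (r c : Nat) : String := (board.getD r []).getD c ""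

-- 'if streak >= 3: for k in range(streak): matched.add(f(e - k))'
def pvAFlush (f : Nat → Int × Int) (e streak : Nat) (s : PySem.Set (Int × Int)) : PySem.Set (Int × Int) :=
  (List.range streak).foldl (fun m k => PySem.Set.add m (f (e - k))) s

-- A's inner loop 'for c in range(1, n)' carrying (matched, streak), plus the final flush at n-1;
-- instantiated once per row (v = the row, f c = (r, c)) and once per column (v = the column, f r = (r, c)).
def pvAInner (v : Nat → String) (n : Nat) (f : Nat → Int × Int) (c streak : Nat)
    (s : PySem.Set (Int × Int)) : PySem.Set (Int × Int) :=
  if h : c < n then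
    if v c == v (c - 1) then
      pvAInner v n f (c + 1) (streak + 1) s
    else
      pvAInner v n f (c + 1) 1 (if 3 ≤ streak then pvAFlush f (c - 1) streak s else s)
  else
    if 3 ≤ streak then pvAFlush f (n - 1) streak s else s
termination_by n - c

def find_matches (board : List (List String)) : List (Int × Int) :=
  let rows := board.length
  let cols := board.headI.length    -- len(board[0]) if rows else 0
  let s1 := (List.range rows).foldl
    (fun s r => pvAInner (fun i => pvGetCell board r i) cols (fun j => ((r : Int), (j : Int))) 1 1 s)
    PySem.Set.empty
  (List.range cols).foldl
    (fun s c => pvAInner (fun i => pvGetCell board i c) rows (fun j => ((j : Int), (c : Int))) 1 1 s)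
    s1

-- ===== PORT B =====
-- 'k = c; while k > 0 and v(k-1) == t: k -= 1'  (t = v c, captured once as in Source B)
def pvBWalk (v : Nat → String) (t : String) (k : Nat) : Nat :=
  if h : 0 < k ∧ v (k - 1) == t then pvBWalk v t (k - 1) else k
termination_by k
decreasing_by exact Nat.sub_lt h.1 one_pos

-- B's line scan: 'for c in range(n): if c == n-1 or v(c+1) != v(c): k = walk; if c-k >= 2: add c..k'
def pvBLine (v : Nat → String) (n : Nat) (f : Nat → Int × Int)
    (s : PySem.Set (Int × Int)) : PySem.Set (Int × Int) :=
  (List.range n).foldl (fun m c =>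
    if c = n - 1 || !(v (c + 1) == v c) then
      let k := pvBWalk v (v c) c
      if 2 ≤ c - k then
        (List.range (c - k + 1)).foldl (fun m' t => PySem.Set.add m' (f (c - t))) m
      else m
    else m) s

def find_matches_alt (board : List (List String)) : List (Int × Int) :=
  let rows := board.length
  let cols := board.headI.length    -- len(board[0]) if rows else 0
  let s1 := (List.range rows).foldl
    (fun s r => pvBLine (fun i => pvGetCell board r i) cols (fun j => ((r : Int), (j : Int))) s)
    PySem.Set.empty
  (List.range cols).foldl
    (fun s c => pvBLine (fun i => pvGetCell board i c) rows (fun j => ((j : Int), (c : Int))) s)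
    s1

-- ===== PRECONDITION & SPEC =====
-- Pre_ excludes exactly the ragged boards on which the Python A raises IndexError: with at least
-- two rows and cols = len(board[0]) >= 1, a row shorter than cols is indexed by the vertical pass
-- (and possibly the horizontal one). On a one-row or zero-column board no out-of-range index is
-- ever formed, and such boards satisfy Pre_ trivially.
def Pre_find_matches (board : List (List String)) : Prop :=
  ∀ row ∈ board, board.headI.length ≤ row.length
instance (board : List (List String)) : Decidable (Pre_find_matches board) := by
  unfold Pre_find_matches; infer_instance

def pvWitness_find_matches : List (List String) :=
  [["a", "a", "a"], ["b", "a", "c"], ["b", "a", "b"]]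

def Spec_find_matches (board : List (List String)) (out : List (Int × Int)) : Prop := out = find_matches_alt board
instance (board : List (List String)) (out : List (Int × Int)) : Decidable (Spec_find_matches board out) := by unfold Spec_find_matches; infer_instance

-- ===== CLAIM (what is proved, stated in full; the proofs are below) =====
def Claim_equal_find_matches : Prop := ∀ (board : List (List String)), Dom_find_matches board → Pre_find_matches board → Spec_find_matches board (find_matches board)

-- ===== LEMMAS AND PROOFS =====

-- run length ending at position c: 1 at breaks, previous+1 inside a run
def pvRunLen (v : Nat → String) : Nat → Nat
  | 0 => 1
  | c + 1 => if v (c + 1) == v c then pvRunLen v c + 1 else 1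

-- the coordinates emitted for position p (nonempty iff p ends a maximal run of length >= 3),
-- in the order both programs add them: p, p-1, ..., run start
def pvEmit (v : Nat → String) (n : Nat) (f : Nat → Int × Int) (p : Nat) : List (Int × Int) :=
  if (p = n - 1 ∨ (v (p + 1) == v p) = false) ∧ 3 ≤ pvRunLen v p then
    (List.range (pvRunLen v p)).map (fun k => f (p - k))
  else []

def pvEmits (v : Nat → String) (n : Nat) (f : Nat → Int × Int) (c : Nat) : List (Int × Int) :=
  if c < n then pvEmit v n f c ++ pvEmits v n f (c + 1) else []
termination_by n - c

lemma pvRunLen_le (v : Nat → String) : ∀ c, pvRunLen v c ≤ c + 1 := by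
  intro c
  induction c with
  | zero => simp [pvRunLen]
  | succ c ih => simp only [pvRunLen]; split <;> omega

lemma pvAFlush_eq (f : Nat → Int × Int) (e L : Nat) (s : PySem.Set (Int × Int)) :
    pvAFlush f e L s = List.foldl PySem.Set.add s ((List.range L).map (fun k => f (e - k))) := by
  simp [pvAFlush, List.foldl_map]

lemma pvAInner_eq_emits (v : Nat → String) (n : Nat) (f : Nat → Int × Int) :
    ∀ d s, d + 1 ≤ n → pvAInner v n f (d + 1) (pvRunLen v d) s
      = List.foldl PySem.Set.add s (pvEmits v n f d) := by
  intro d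
  induction hfuel : n - d using Nat.strong_induction_on generalizing d with
  | _ fuel ih =>
  intro s hdn
  by_cases hlt : d + 1 < n
  · rw [pvAInner]
    simp only [Nat.add_sub_cancel]
    have hne : d ≠ n - 1 := by omega
    rw [pvEmits]; simp only [if_pos (by omega : d < n)]
    rw [dif_pos hlt]
    by_cases hb : (v (d + 1) == v d) = true
    · rw [if_pos hb]
      have hemit : pvEmit v n f d = [] := by
        simp [pvEmit, hne, hb]
      have hrl : pvRunLen v (d + 1) = pvRunLen v d + 1 := by
        simp [pvRunLen, hb]
      have ih' := ih (n - (d + 1)) (by omega) (d + 1) rfl s (by omega)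
      rw [hrl] at ih'
      rw [ih', hemit, List.nil_append]
    · rw [if_neg hb]
      have hrl : pvRunLen v (d + 1) = 1 := by
        simp [pvRunLen, hb]
      have ih' := ih (n - (d + 1)) (by omega) (d + 1) rfl
        (if 3 ≤ pvRunLen v d then pvAFlush f d (pvRunLen v d) s else s) (by omega)
      rw [hrl] at ih'
      rw [ih', List.foldl_append]
      congr 1
      have hemit : pvEmit v n f d
          = if 3 ≤ pvRunLen v d then (List.range (pvRunLen v d)).map (fun k => f (d - k)) else [] := by
        simp [pvEmit, eq_false_of_ne_true hb]
      rw [hemit]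
      by_cases h3 : 3 ≤ pvRunLen v d
      · rw [if_pos h3, if_pos h3, pvAFlush_eq]
      · rw [if_neg h3, if_neg h3, List.foldl_nil]
  · -- d + 1 = n : the final flush
    rw [pvAInner]
    rw [dif_neg (by omega : ¬ d + 1 < n)]
    rw [pvEmits]; simp only [if_pos (by omega : d < n)]
    rw [pvEmits]; simp only [if_neg (by omega : ¬ d + 1 < n)]
    have hend : d = n - 1 := by omega
    have hemit : pvEmit v n f d
        = if 3 ≤ pvRunLen v d then (List.range (pvRunLen v d)).map (fun k => f (d - k)) else [] := by
      simp [pvEmit, hend]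
    rw [List.append_nil, hemit, ← hend]
    by_cases h3 : 3 ≤ pvRunLen v d
    · rw [if_pos h3, if_pos h3, pvAFlush_eq]
    · rw [if_neg h3, if_neg h3, List.foldl_nil]

lemma pvBWalk_eq (v : Nat → String) : ∀ c, pvBWalk v (v c) c = c + 1 - pvRunLen v c := by
  intro c
  induction c with
  | zero => rw [pvBWalk]; simp [pvRunLen]
  | succ c ih =>
    rw [pvBWalk]
    simp only [Nat.add_sub_cancel]
    by_cases hb : (v (c + 1) == v c) = true
    · have heq : v (c + 1) = v c := by simpa using hb
      have hcond : 0 < c + 1 ∧ (v c == v (c + 1)) = true := by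
        refine ⟨by omega, ?_⟩
        rw [heq]; exact beq_self_eq_true _
      rw [dif_pos hcond]
      have hrw : pvBWalk v (v (c + 1)) c = pvBWalk v (v c) c := by rw [heq]
      rw [hrw, ih]
      have := pvRunLen_le v c
      simp only [pvRunLen, if_pos hb]
      omega
    · have hcond : ¬ (0 < c + 1 ∧ (v c == v (c + 1)) = true) := by
        rintro ⟨-, h⟩
        exact hb (beq_iff_eq.mpr (beq_iff_eq.mp h).symm)
      rw [dif_neg hcond]
      simp [pvRunLen, hb]

lemma foldl_foldl_flatMap {α β : Type} (g : α → Int × Int → α) (h : β → List (Int × Int)) :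
    ∀ (l : List β) (s : α),
      l.foldl (fun m x => (h x).foldl g m) s = (l.flatMap h).foldl g s := by
  intro l
  induction l with
  | nil => intro s; simp
  | cons x xs ih => intro s; simp [List.foldl_cons, List.flatMap_cons, List.foldl_append, ih]

lemma pvBLine_step (v : Nat → String) (n : Nat) (f : Nat → Int × Int)
    (m : PySem.Set (Int × Int)) (c : Nat) :
    (if c = n - 1 || !(v (c + 1) == v c) then
      (fun k => if 2 ≤ c - k then
          (List.range (c - k + 1)).foldl (fun m' t => PySem.Set.add m' (f (c - t))) m
        else m) (pvBWalk v (v c) c)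
    else m) = List.foldl PySem.Set.add m (pvEmit v n f c) := by
  have hw := pvBWalk_eq v c
  have hle := pvRunLen_le v c
  have hpos : 1 ≤ pvRunLen v c := by
    cases hc : c with
    | zero => simp [pvRunLen]
    | succ d => simp only [pvRunLen]; split <;> omega
  by_cases hend : (c = n - 1 || !(v (c + 1) == v c)) = true
  · simp only [if_pos hend]
    have hend' : c = n - 1 ∨ (v (c + 1) == v c) = false := by
      rcases Bool.or_eq_true_iff.mp hend with h | h
      · exact Or.inl (by simpa using h)
      · exact Or.inr (by simpa using h)
    rw [hw]
    have hck : c - (c + 1 - pvRunLen v c) = pvRunLen v c - 1 := by omega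
    by_cases h3 : 3 ≤ pvRunLen v c
    · have h2 : 2 ≤ c - (c + 1 - pvRunLen v c) := by omega
      simp only [if_pos h2]
      have hcnt : c - (c + 1 - pvRunLen v c) + 1 = pvRunLen v c := by omega
      rw [hcnt]
      rw [pvEmit, if_pos ⟨hend', h3⟩]
      simp [List.foldl_map]
    · have h2 : ¬ 2 ≤ c - (c + 1 - pvRunLen v c) := by omega
      simp only [if_neg h2]
      rw [pvEmit, if_neg (by tauto)]
      simp
  · simp only [if_neg hend]
    have : ¬ (c = n - 1 ∨ (v (c + 1) == v c) = false) := by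
      rintro (h | h)
      · exact hend (by simp [h])
      · exact hend (by simp [h])
    rw [pvEmit, if_neg (by tauto)]
    simp

lemma pvEmits_eq_flatMap (v : Nat → String) (n : Nat) (f : Nat → Int × Int) :
    ∀ c, pvEmits v n f c = (List.range' c (n - c)).flatMap (pvEmit v n f) := by
  intro c
  induction hfuel : n - c using Nat.strong_induction_on generalizing c with
  | _ fuel ih =>
  subst hfuel
  by_cases hc : c < n
  · rw [pvEmits, if_pos hc]
    obtain ⟨k, hk⟩ : ∃ k, n - c = k + 1 := ⟨n - c - 1, by omega⟩
    rw [hk, List.range'_succ, List.flatMap_cons]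
    rw [ih (n - (c + 1)) (by omega) (c + 1) rfl]
    have hk' : n - (c + 1) = k := by omega
    rw [hk']
  · rw [pvEmits, if_neg hc]
    have h0 : n - c = 0 := by omega
    rw [h0]
    simp

lemma pvBLine_eq_emits (v : Nat → String) (n : Nat) (f : Nat → Int × Int)
    (s : PySem.Set (Int × Int)) :
    pvBLine v n f s = List.foldl PySem.Set.add s (pvEmits v n f 0) := by
  unfold pvBLine
  have hfun : (fun (m : PySem.Set (Int × Int)) (c : Nat) =>
      if c = n - 1 || !(v (c + 1) == v c) then
        let k := pvBWalk v (v c) c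
        if 2 ≤ c - k then
          (List.range (c - k + 1)).foldl (fun m' t => PySem.Set.add m' (f (c - t))) m
        else m
      else m)
      = fun m c => (pvEmit v n f c).foldl PySem.Set.add m := by
    funext m c
    exact pvBLine_step v n f m c
  rw [hfun, foldl_foldl_flatMap, pvEmits_eq_flatMap v n f 0]
  simp [List.range_eq_range']

lemma pvLine_eq (v : Nat → String) (n : Nat) (f : Nat → Int × Int) (s : PySem.Set (Int × Int)) :
    pvAInner v n f 1 1 s = pvBLine v n f s := by
  rw [pvBLine_eq_emits]
  cases n with
  | zero =>
    rw [pvAInner]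
    rw [pvEmits]
    simp
  | succ m =>
    have h1 : (1 : Nat) = pvRunLen v 0 := by simp [pvRunLen]
    have := pvAInner_eq_emits v (m + 1) f 0 s (by omega)
    simpa [pvRunLen] using this

-- ===== VERDICT (by name: the statement is the Claim_ definition above) =====
theorem find_matches_spec : Claim_equal_find_matches := by
  intro board _ _
  unfold Spec_find_matches find_matches find_matches_alt
  simp only [pvLine_eq]
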